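-- pv_equiv track=rewrite | github.com/alicesister1/leetcode | binary-number-with-alternating-bits/binary-number-with-alternating-bits.py | soulition2
-- ===== SOURCE A (Python) =====
-- def soulition2(n: int) -> bool:
--     # and 연산을 통해 첫 번째(2^0) 비트를 구함.
--     prev_bit = n & 1
--     while n != 1:
--         # 오른쪽 쉬프트 한 n의 첫 번째 비트를 구함
--         n = n >> 1
--         current_bit = n & 1
--
--         # 현재 첫 번째 비트와 이전 첫 번째 비트를 비교. 다른 경우만 1 출력되는 xor 사용
--         isDiff = current_bit ^ prev_bit
--         if isDiff == 0:
--             return False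
--
--         # 현재 첫 번째 비트를 다음 n의 첫 번째 비트와 비교를 위해 저장
--         prev_bit = current_bit
--     return True
-- ===== SOURCE B (Python) =====
-- def soulition2(n: int) -> bool:
--     # closed-form alternating-bits check: n ^ (n >> 1) is all ones iff bits alternate
--     if n < 1:
--         return False
--     m = n ^ (n >> 1)
--     return m & (m + 1) == 0
-- ===== Notes on version B (the rewrite author's own statement) =====
-- stated objective: idiomatic
-- what changed: Replaces A's bit-by-bit shifting loop with prev-bit state by the closed-form trick m = n ^ (n >> 1); m & (m + 1) == 0, behind a single positivity guard that reproduces A's rejection of non-positive inputs, removing the loop entirely.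
import Mathlib
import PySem

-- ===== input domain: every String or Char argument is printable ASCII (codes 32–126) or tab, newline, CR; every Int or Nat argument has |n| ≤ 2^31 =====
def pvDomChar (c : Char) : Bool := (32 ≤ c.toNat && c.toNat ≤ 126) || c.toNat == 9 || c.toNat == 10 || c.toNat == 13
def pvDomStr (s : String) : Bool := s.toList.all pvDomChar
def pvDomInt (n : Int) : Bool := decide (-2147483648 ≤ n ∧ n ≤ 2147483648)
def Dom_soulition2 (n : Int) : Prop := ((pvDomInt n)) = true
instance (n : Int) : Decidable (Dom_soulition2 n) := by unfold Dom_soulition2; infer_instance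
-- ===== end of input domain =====

-- B replaces A's bit-shifting loop by the closed-form check m = n ^ (n >> 1); m & (m+1) == 0 (idiomatic, loop-free).


-- ===== PORT A =====
-- termination measure for A's while-loop (the loop returns False as soon as two
-- adjacent bits agree; on non-positive inputs that happens within at most two iterations)
def soulition2Measure (n prev : Int) : Nat :=
  2 * n.natAbs +
    (if n = 0 then (if prev = 0 then 0 else 1)
     else if n = -1 then (if prev = 1 then 0 else 1)
     else 0)

-- while n != 1: n >>= 1; current = n & 1; if current ^ prev == 0: return False; prev = current
def soulition2Loop (n prev : Int) : Bool :=
  if n = 1 then true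
  else
    if PySem.Int.bxor (PySem.Int.band (n >>> (1 : Nat)) 1) prev = 0 then false
    else soulition2Loop (n >>> (1 : Nat)) (PySem.Int.band (n >>> (1 : Nat)) 1)
termination_by soulition2Measure n prev
decreasing_by
  rename_i h1 h2
  simp only [soulition2Measure]
  rw [Int.shiftRight_eq_div_pow, pow_one] at *
  push_cast at *
  rcases lt_trichotomy n 0 with hn | hn | hn
  · rcases eq_or_ne n (-1) with rfl | hne
    · -- n = -1 : next state is (-1, 1); the hypothesis forbids prev = 1
      have hb : PySem.Int.band ((-1 : Int) / 2) 1 = 1 := by decide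
      rw [hb] at h2
      have hp : prev ≠ 1 := by rintro rfl; exact h2 (by decide)
      simp only [hb]
      norm_num [hp]
    · -- n ≤ -2 : |n/2| < |n|
      have : (n / 2).natAbs < n.natAbs := by omega
      split_ifs <;> omega
  · -- n = 0 : next state is (0, 0); the hypothesis forbids prev = 0
    subst hn
    have hb : PySem.Int.band ((0 : Int) / 2) 1 = 0 := by decide
    rw [hb] at h2
    have hp : prev ≠ 0 := by rintro rfl; exact h2 (by decide)
    simp only [hb]
    norm_num [hp]
  · -- n ≥ 2 : |n/2| < |n|
    have : (n / 2).natAbs < n.natAbs := by omega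
    split_ifs <;> omega

def soulition2 (n : Int) : Bool :=
  soulition2Loop n (PySem.Int.band n 1)

-- ===== PORT B =====
def soulition2_alt (n : Int) : Bool :=
  if n < 1 then false
  else
    decide (PySem.Int.band (PySem.Int.bxor n (n >>> (1 : Nat)))
      (PySem.Int.bxor n (n >>> (1 : Nat)) + 1) = 0)

-- ===== PRECONDITION & SPEC =====
def Spec_soulition2 (n : Int) (out : Bool) : Prop := out = soulition2_alt n
instance (n : Int) (out : Bool) : Decidable (Spec_soulition2 n out) := by unfold Spec_soulition2; infer_instance

-- ===== CLAIM (what is proved, stated in full; the proofs are below) =====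
def Claim_equal_soulition2 : Prop := ∀ (n : Int), Dom_soulition2 n → Spec_soulition2 n (soulition2 n)

-- ===== LEMMAS AND PROOFS =====

-- Nat-level version of B's closed-form check, used to run the induction on ℕ
def natAltCheck (a : Nat) : Bool :=
  decide ((a ^^^ a >>> 1) &&& ((a ^^^ a >>> 1) + 1) = 0)

theorem and_succ_of_even (m : Nat) (h : m % 2 = 0) : m &&& (m + 1) = m := by
  have h1 : (m &&& (m + 1)) % 2 = 0 := by
    rcases Nat.mod_two_eq_zero_or_one (m &&& (m + 1)) with h' | h'
    · exact h'
    · exact absurd (Nat.and_mod_two_eq_one.mp h').1 (by omega)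
  have h2 : (m &&& (m + 1)) / 2 = m / 2 &&& (m + 1) / 2 := Nat.and_div_two
  have h3 : (m + 1) / 2 = m / 2 := by omega
  rw [h3] at h2
  have h4 : m / 2 &&& m / 2 = m / 2 := Nat.and_self _
  omega

theorem and_succ_of_odd (m : Nat) (h : m % 2 = 1) :
    m &&& (m + 1) = 2 * (m / 2 &&& (m / 2 + 1)) := by
  have h1 : (m &&& (m + 1)) % 2 = 0 := by
    rcases Nat.mod_two_eq_zero_or_one (m &&& (m + 1)) with h' | h'
    · exact h'
    · exact absurd (Nat.and_mod_two_eq_one.mp h').2 (by omega)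
  have h2 : (m &&& (m + 1)) / 2 = m / 2 &&& (m + 1) / 2 := Nat.and_div_two
  have h3 : (m + 1) / 2 = m / 2 + 1 := by omega
  rw [h3] at h2
  omega

theorem natCast_shiftRight_one (a : Nat) : ((a : Int) >>> (1 : Nat)) = ((a / 2 : Nat) : Int) := by
  rw [Int.shiftRight_eq_div_pow, pow_one]
  omega

theorem band_one_natCast (a : Nat) : PySem.Int.band (a : Int) 1 = ((a % 2 : Nat) : Int) := by
  have : ((1 : Nat) : Int) = (1 : Int) := rfl
  rw [← this, PySem.Int.band_natCast, Nat.and_one_is_mod]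

theorem soulition2Loop_neg (n prev : Int) : n < 0 → soulition2Loop n prev = false := by
  induction n, prev using soulition2Loop.induct with
  | case1 prev => intro h; exact absurd h (by norm_num)
  | case2 n prev h1 h2 => intro _; rw [soulition2Loop, if_neg h1, if_pos h2]
  | case3 n prev h1 h2 ih =>
    intro h
    rw [soulition2Loop, if_neg h1, if_neg h2]
    exact ih (by rw [Int.shiftRight_eq_div_pow, pow_one]; omega)

theorem soulition2Loop_pos (a : Nat) (h : 1 ≤ a) :
    soulition2Loop (a : Int) (PySem.Int.band (a : Int) 1) = natAltCheck a := by
  induction a using Nat.strong_induction_on with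
  | _ a ih =>
    rcases eq_or_lt_of_le h with rfl | h2
    · rw [soulition2Loop]; decide
    · -- a ≥ 2
      have ha2 : 2 ≤ a := h2
      rw [soulition2Loop]
      rw [if_neg (by exact_mod_cast by omega : ¬ ((a : Int) = 1))]
      rw [natCast_shiftRight_one, band_one_natCast, band_one_natCast]
      have hxz : PySem.Int.bxor (((a / 2) % 2 : Nat) : Int) ((a % 2 : Nat) : Int)
          = (((a / 2) % 2 ^^^ a % 2 : Nat) : Int) := PySem.Int.bxor_natCast _ _
      rw [hxz]
      have hsr : a >>> 1 = a / 2 := Nat.shiftRight_one a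
      by_cases heq : (a / 2) % 2 = a % 2
      · -- adjacent bits agree: both sides are false
        rw [if_pos (by exact_mod_cast by simp [heq] : (((a / 2) % 2 ^^^ a % 2 : Nat) : Int) = 0)]
        have hm2 : (a ^^^ a / 2) % 2 = 0 := by
          rcases Nat.mod_two_eq_zero_or_one (a ^^^ a / 2) with h' | h'
          · exact h'
          · have := Nat.xor_mod_two_eq_one.mp h'; omega
        have hmne : a ^^^ a / 2 ≠ 0 := by
          intro h0
          have : a = a / 2 := Nat.eq_of_xor_eq_zero h0
          omega
        have := and_succ_of_even (a ^^^ a / 2) hm2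
        simp only [natAltCheck, hsr]
        simp [this, hmne]
      · -- adjacent bits differ: recurse / halve
        rw [if_neg (by exact_mod_cast by simpa using heq :
          ¬ ((((a / 2) % 2 ^^^ a % 2 : Nat) : Int) = 0))]
        rw [← band_one_natCast]
        rw [ih (a / 2) (by omega) (by omega)]
        -- natAltCheck a = natAltCheck (a / 2)
        have hm2 : (a ^^^ a / 2) % 2 = 1 := by
          rcases Nat.mod_two_eq_zero_or_one (a ^^^ a / 2) with h' | h'
          · exfalso
            have hne : ¬ (a ^^^ a / 2) % 2 = 1 := by omega
            rw [Nat.xor_mod_two_eq_one] at hne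
            push Not at hne
            rcases Nat.mod_two_eq_zero_or_one a with ha | ha <;>
              rcases Nat.mod_two_eq_zero_or_one (a / 2) with hb | hb <;> simp [ha, hb] at hne <;> omega
          · exact h'
        have hdiv : (a ^^^ a / 2) / 2 = a / 2 ^^^ a / 2 / 2 := Nat.xor_div_two
        have hK := and_succ_of_odd (a ^^^ a / 2) hm2
        simp only [natAltCheck, hsr, Nat.shiftRight_one]
        rw [hK, hdiv]
        simp

theorem alt_pos (a : Nat) (h : 1 ≤ a) : soulition2_alt (a : Int) = natAltCheck a := by
  unfold soulition2_alt
  rw [if_neg (by exact_mod_cast by omega : ¬ ((a : Int) < 1))]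
  rw [natCast_shiftRight_one, PySem.Int.bxor_natCast]
  have h1 : ((a ^^^ a / 2 : Nat) : Int) + 1 = ((a ^^^ a / 2) + 1 : Nat) := by push_cast; ring
  rw [h1, PySem.Int.band_natCast]
  simp [natAltCheck, Nat.shiftRight_one]

-- ===== VERDICT (by name: the statement is the Claim_ definition above) =====
theorem soulition2_spec : Claim_equal_soulition2 := by
  intro n _
  unfold Spec_soulition2
  rcases lt_trichotomy n 0 with hn | rfl | hn
  · -- negative: A's loop never accepts, B's guard returns false
    rw [soulition2, soulition2Loop_neg n _ hn, soulition2_alt, if_pos (by omega)]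
  · -- zero
    have hA : soulition2 0 = false := by
      rw [soulition2, soulition2Loop, if_neg (by norm_num), if_pos (by decide)]
    have hB : soulition2_alt 0 = false := by decide
    rw [hA, hB]
  · -- positive: reduce to the ℕ-level induction
    obtain ⟨a, rfl⟩ : ∃ a : Nat, n = (a : Int) := ⟨n.toNat, by omega⟩
    have ha : 1 ≤ a := by exact_mod_cast by omega
    rw [soulition2, soulition2Loop_pos a ha, alt_pos a ha]
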